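-- pv_equiv track=rewrite | github.com/Thinksky5124/SVTAS | svtas/metric/temporal_action_segmentation/temporal_action_segmentation_metric_utils.py | get_labels_start_end_time
-- ===== SOURCE A (Python) =====
-- ignore_bg_class = ["background", "None"]
--
-- def get_labels_start_end_time(frame_wise_labels, bg_class=ignore_bg_class):
--     labels = []
--     starts = []
--     ends = []
--     last_label = frame_wise_labels[0]
--     if frame_wise_labels[0] not in bg_class:
--         labels.append(frame_wise_labels[0])
--         starts.append(0)
--     for i in range(len(frame_wise_labels)):
--         if frame_wise_labels[i] != last_label:
--             if frame_wise_labels[i] not in bg_class: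
--                 labels.append(frame_wise_labels[i])
--                 starts.append(i)
--             if last_label not in bg_class:
--                 ends.append(i)
--             last_label = frame_wise_labels[i]
--     if last_label not in bg_class:
--         ends.append(i + 1)
--     return labels, starts, ends
-- ===== SOURCE B (Python) =====
-- ignore_bg_class = ["background", "None"]
--
-- def get_labels_start_end_time(frame_wise_labels, bg_class=ignore_bg_class):
--     labels, starts, ends = [], [], []
--     n = len(frame_wise_labels)
--     i = 0
--     while i < n:
--         j = i
--         while j < n and frame_wise_labels[j] == frame_wise_labels[i]:
--             j += 1
--         if frame_wise_labels[i] not in bg_class: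
--             labels.append(frame_wise_labels[i])
--             starts.append(i)
--             ends.append(j)
--         i = j
--     return labels, starts, ends
-- ===== Notes on version B (the rewrite author's own statement) =====
-- stated objective: simpler
-- what changed: Replaces A's element-by-element scan with a last_label state variable and staggered appends (first run pre-appended, last end post-appended) by a two-pointer run scan that finds each maximal run [i,j) and appends label, start and end together; bg_class membership is tested once per run instead of per frame.
-- crash fix: On an empty frame_wise_labels list A raises IndexError (it reads frame_wise_labels[0]); B returns ([], [], []). — e.g. on get_labels_start_end_time([], ["background", "None"]): A raises IndexError, B returns ([], [], [])
import Mathlib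
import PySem

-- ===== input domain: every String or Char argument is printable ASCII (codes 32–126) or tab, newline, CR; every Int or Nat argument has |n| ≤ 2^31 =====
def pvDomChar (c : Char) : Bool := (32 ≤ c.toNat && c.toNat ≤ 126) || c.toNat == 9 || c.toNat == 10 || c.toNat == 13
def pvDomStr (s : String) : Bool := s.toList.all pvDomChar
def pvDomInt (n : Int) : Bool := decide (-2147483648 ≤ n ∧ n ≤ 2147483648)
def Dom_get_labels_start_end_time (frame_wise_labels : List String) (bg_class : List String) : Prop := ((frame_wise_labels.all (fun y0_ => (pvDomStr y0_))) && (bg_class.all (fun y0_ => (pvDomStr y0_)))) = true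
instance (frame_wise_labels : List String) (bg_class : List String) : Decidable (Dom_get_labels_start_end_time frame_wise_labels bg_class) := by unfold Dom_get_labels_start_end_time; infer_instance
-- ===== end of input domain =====

-- B replaces A's staggered single-element scan (last_label state, first run pre-appended,
-- last end post-appended) by a two-pointer scan over maximal runs that appends label, start
-- and end together; equal results are proved on all non-empty inputs (A raises on []).

-- ===== PORT A =====
-- enumerate of the list starting at index i (Python: `for i in range(len(..))` with indexing)
def pvEnumFrom (i : Nat) : List String → List (Nat × String)
  | [] => []
  | x :: t => (i, x) :: pvEnumFrom (i + 1) t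

-- one iteration of A's for-loop: state = ((labels, starts, ends), last_label)
def pvStepA (bg : List String) (st : (List String × List Int × List Int) × String)
    (p : Nat × String) : (List String × List Int × List Int) × String :=
  let ((labels, starts, ends), last) := st
  if p.2 ≠ last then
    ((if p.2 ∈ bg then labels else labels ++ [p.2],
      if p.2 ∈ bg then starts else starts ++ [(p.1 : Int)],
      if last ∈ bg then ends else ends ++ [(p.1 : Int)]), p.2)
  else st

def get_labels_start_end_time (frame_wise_labels : List String) (bg_class : List String) :
    List String × List Int × List Int :=
  match frame_wise_labels with
  | [] => ([], [], [])  -- Python raises IndexError here; excluded by Pre_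
  | h :: _ =>
    let labels0 := if h ∈ bg_class then ([] : List String) else [h]
    let starts0 := if h ∈ bg_class then ([] : List Int) else [(0 : Int)]
    let r := (pvEnumFrom 0 frame_wise_labels).foldl (pvStepA bg_class) ((labels0, starts0, []), h)
    (r.1.1, r.1.2.1,
      if r.2 ∈ bg_class then r.1.2.2 else r.1.2.2 ++ [(frame_wise_labels.length : Int)])

-- ===== PORT B =====
-- inner while loop of B: smallest j ≥ start with j = n or fw[j] ≠ lab
def pvRunEnd (fw : List String) (lab : String) (j : Nat) : Nat :=
  if j < fw.length then
    if fw.getD j "" = lab then pvRunEnd fw lab (j + 1) else j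
  else j
termination_by fw.length - j

theorem pvRunEnd_ge (fw : List String) (lab : String) (j : Nat) : j ≤ pvRunEnd fw lab j := by
  fun_induction pvRunEnd fw lab j with
  | case1 j _ _ _ => omega
  | case2 => omega
  | case3 => omega

theorem pvRunEnd_gt (fw : List String) (i : Nat) (h : i < fw.length) :
    i < pvRunEnd fw (fw.getD i "") i := by
  rw [pvRunEnd]
  simp only [h, if_true]
  have := pvRunEnd_ge fw (fw.getD i "") (i + 1)
  omega

-- outer while loop of B
def pvLoopB (fw bg : List String) (i : Nat)
    (labels : List String) (starts ends : List Int) : List String × List Int × List Int :=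
  if h : i < fw.length then
    let lab := fw.getD i ""
    let j := pvRunEnd fw lab i
    if lab ∈ bg then pvLoopB fw bg j labels starts ends
    else pvLoopB fw bg j (labels ++ [lab]) (starts ++ [(i : Int)]) (ends ++ [(j : Int)])
  else (labels, starts, ends)
termination_by fw.length - i
decreasing_by
  · have := pvRunEnd_gt fw i h; omega
  · have := pvRunEnd_gt fw i h; omega

def get_labels_start_end_time_alt (frame_wise_labels : List String) (bg_class : List String) :
    List String × List Int × List Int :=
  pvLoopB frame_wise_labels bg_class 0 [] [] []

-- ===== PRECONDITION & SPEC =====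
-- Pre_ excludes only the empty list, on which Python A raises IndexError.
def Pre_get_labels_start_end_time (frame_wise_labels : List String) (bg_class : List String) : Prop :=
  frame_wise_labels ≠ []
instance (frame_wise_labels : List String) (bg_class : List String) : Decidable (Pre_get_labels_start_end_time frame_wise_labels bg_class) := by unfold Pre_get_labels_start_end_time; infer_instance

def pvWitness_get_labels_start_end_time : List String × List String :=
  (["walk", "walk", "background", "run"], ["background", "None"])

-- On an empty frame_wise_labels list A raises IndexError (it reads frame_wise_labels[0]); B returns ([], [], []).
def Raises_get_labels_start_end_time (frame_wise_labels : List String) (bg_class : List String) : Prop :=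
  frame_wise_labels = []
instance (frame_wise_labels : List String) (bg_class : List String) : Decidable (Raises_get_labels_start_end_time frame_wise_labels bg_class) := by unfold Raises_get_labels_start_end_time; infer_instance

def pvRaiseWitness_get_labels_start_end_time : List String × List String := ([], ["background", "None"])
def pvRaiseWitnessOut_get_labels_start_end_time : List String × List Int × List Int := ([], [], [])

def Spec_get_labels_start_end_time (frame_wise_labels : List String) (bg_class : List String) (out : List String × List Int × List Int) : Prop := out = get_labels_start_end_time_alt frame_wise_labels bg_class
instance (frame_wise_labels : List String) (bg_class : List String) (out : List String × List Int × List Int) : Decidable (Spec_get_labels_start_end_time frame_wise_labels bg_class out) := by unfold Spec_get_labels_start_end_time; infer_instance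

-- ===== CLAIM (what is proved, stated in full; the proofs are below) =====
def Claim_equal_get_labels_start_end_time : Prop := ∀ (frame_wise_labels : List String) (bg_class : List String), Dom_get_labels_start_end_time frame_wise_labels bg_class → Pre_get_labels_start_end_time frame_wise_labels bg_class → Spec_get_labels_start_end_time frame_wise_labels bg_class (get_labels_start_end_time frame_wise_labels bg_class)
def Claim_raises_get_labels_start_end_time : Prop := (∀ (frame_wise_labels : List String) (bg_class : List String), Dom_get_labels_start_end_time frame_wise_labels bg_class → Raises_get_labels_start_end_time frame_wise_labels bg_class → ¬ Pre_get_labels_start_end_time frame_wise_labels bg_class) ∧ (Dom_get_labels_start_end_time (pvRaiseWitness_get_labels_start_end_time.1) (pvRaiseWitness_get_labels_start_end_time.2) ∧ Raises_get_labels_start_end_time (pvRaiseWitness_get_labels_start_end_time.1) (pvRaiseWitness_get_labels_start_end_time.2) ∧ get_labels_start_end_time_alt (pvRaiseWitness_get_labels_start_end_time.1) (pvRaiseWitness_get_labels_start_end_time.2) = pvRaiseWitnessOut_get_labels_start_end_time)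

-- ===== LEMMAS AND PROOFS =====

-- length of the leading run of `lab`
def pvCL (lab : String) : List String → Nat
  | [] => 0
  | x :: t => if x = lab then pvCL lab t + 1 else 0

-- the common specification: the runs of l (starting at absolute index i), one append per run
def pvG (bg : List String) (i : Nat) (l : List String) : List String × List Int × List Int :=
  match l with
  | [] => ([], [], [])
  | x :: t =>
    let c := pvCL x t
    let rest := pvG bg (i + (c + 1)) (t.drop c)
    if x ∈ bg then rest
    else (x :: rest.1, (i : Int) :: rest.2.1, ((i + (c + 1) : Nat) : Int) :: rest.2.2)
termination_by l.length
decreasing_by simp [List.length_drop]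

theorem pvG_nil (bg : List String) (i : Nat) : pvG bg i [] = ([], [], []) := by
  unfold pvG; rfl

theorem pvG_cons (bg : List String) (i : Nat) (x : String) (t : List String) :
    pvG bg i (x :: t) =
      if x ∈ bg then pvG bg (i + (pvCL x t + 1)) (t.drop (pvCL x t))
      else (x :: (pvG bg (i + (pvCL x t + 1)) (t.drop (pvCL x t))).1,
            (i : Int) :: (pvG bg (i + (pvCL x t + 1)) (t.drop (pvCL x t))).2.1,
            ((i + (pvCL x t + 1) : Nat) : Int) :: (pvG bg (i + (pvCL x t + 1)) (t.drop (pvCL x t))).2.2) := by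
  conv_lhs => unfold pvG

theorem pvGetD_eq (fw : List String) (i : Nat) (h : i < fw.length) : fw.getD i "" = fw[i] := by
  rw [List.getD_eq_getElem?_getD, List.getElem?_eq_getElem h]; rfl

theorem pvRunEnd_eq (fw : List String) (lab : String) (j : Nat) :
    pvRunEnd fw lab j = j + pvCL lab (fw.drop j) := by
  fun_induction pvRunEnd fw lab j with
  | case1 j h h2 ih =>
    have hx : fw[j] = lab := pvGetD_eq fw j h ▸ h2
    rw [ih, List.drop_eq_getElem_cons h]
    simp [pvCL, hx]; omega
  | case2 j h h2 =>
    have hx : ¬ fw[j] = lab := pvGetD_eq fw j h ▸ h2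
    rw [List.drop_eq_getElem_cons h]
    simp [pvCL, hx]
  | case3 j h =>
    rw [List.drop_eq_nil_of_le (by omega)]; simp [pvCL]

-- B's outer loop accumulates exactly the runs of the remaining suffix
theorem pvLoopB_eq (fw bg : List String) (i : Nat) (L : List String) (S E : List Int) :
    pvLoopB fw bg i L S E =
      (L ++ (pvG bg i (fw.drop i)).1,
       S ++ (pvG bg i (fw.drop i)).2.1,
       E ++ (pvG bg i (fw.drop i)).2.2) := by
  fun_induction pvLoopB fw bg i L S E with
  | case1 i L S E h lab j hbg ih =>
    have hj : j = i + (pvCL fw[i] (fw.drop (i + 1)) + 1) := by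
      show pvRunEnd fw lab i = _
      rw [pvRunEnd_eq, List.drop_eq_getElem_cons h]
      show i + pvCL (fw.getD i "") _ = _
      rw [pvGetD_eq fw i h]
      simp [pvCL]
    have hmem : fw[i] ∈ bg := by rw [← pvGetD_eq fw i h]; exact hbg
    rw [ih, List.drop_eq_getElem_cons h, pvG_cons, if_pos hmem, hj, List.drop_drop]
    rw [show i + (pvCL fw[i] (fw.drop (i+1)) + 1) = i + 1 + pvCL fw[i] (fw.drop (i+1)) from by omega]
  | case2 i L S E h lab j hbg ih =>
    have hj : j = i + (pvCL fw[i] (fw.drop (i + 1)) + 1) := by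
      show pvRunEnd fw lab i = _
      rw [pvRunEnd_eq, List.drop_eq_getElem_cons h]
      show i + pvCL (fw.getD i "") _ = _
      rw [pvGetD_eq fw i h]
      simp [pvCL]
    have hmem : ¬ fw[i] ∈ bg := by rw [← pvGetD_eq fw i h]; exact hbg
    have hlab : lab = fw[i] := pvGetD_eq fw i h
    rw [ih, List.drop_eq_getElem_cons h, pvG_cons, if_neg hmem, hlab, hj, List.drop_drop]
    rw [show i + (pvCL fw[i] (fw.drop (i+1)) + 1) = i + 1 + pvCL fw[i] (fw.drop (i+1)) from by omega]
    simp
  | case3 i L S E h =>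
    rw [List.drop_eq_nil_of_le (by omega), pvG_nil]; simp

theorem b_eq_g (fw bg : List String) :
    get_labels_start_end_time_alt fw bg = pvG bg 0 fw := by
  rw [get_labels_start_end_time_alt, pvLoopB_eq]; simp

-- A's fold over the remaining frames, with accumulated state, equals the run decomposition
theorem foldA_eq (bg : List String) (l : List String) : ∀ (i : Nat) (last : String)
    (L : List String) (S E : List Int),
    (((pvEnumFrom i l).foldl (pvStepA bg) ((L, S, E), last)).1.1,
     ((pvEnumFrom i l).foldl (pvStepA bg) ((L, S, E), last)).1.2.1,
     if ((pvEnumFrom i l).foldl (pvStepA bg) ((L, S, E), last)).2 ∈ bg then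
       ((pvEnumFrom i l).foldl (pvStepA bg) ((L, S, E), last)).1.2.2
     else ((pvEnumFrom i l).foldl (pvStepA bg) ((L, S, E), last)).1.2.2 ++ [((i + l.length : Nat) : Int)])
    =
    (L ++ (pvG bg (i + pvCL last l) (l.drop (pvCL last l))).1,
     S ++ (pvG bg (i + pvCL last l) (l.drop (pvCL last l))).2.1,
     (E ++ if last ∈ bg then [] else [((i + pvCL last l : Nat) : Int)]) ++
       (pvG bg (i + pvCL last l) (l.drop (pvCL last l))).2.2) := by
  induction l with
  | nil =>
    intro i last L S E
    simp only [pvEnumFrom, List.foldl_nil, pvCL, List.drop_nil, pvG_nil, List.length_nil,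
      Nat.add_zero, List.append_nil]
    split <;> simp
  | cons x t ih =>
    intro i last L S E
    simp only [pvEnumFrom, List.foldl_cons]
    by_cases hx : x = last
    · subst hx
      rw [show pvStepA bg ((L, S, E), x) (i, x) = ((L, S, E), x) from by simp [pvStepA]]
      have H := ih (i + 1) x L S E
      rw [show (i + (x :: t).length) = ((i + 1) + t.length) from by simp; omega]
      rw [H]
      rw [show pvCL x (x :: t) = pvCL x t + 1 from by simp [pvCL]]
      rw [show (x :: t).drop (pvCL x t + 1) = t.drop (pvCL x t) from rfl]
      rw [show i + (pvCL x t + 1) = (i + 1) + pvCL x t from by omega]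
    · rw [show pvStepA bg ((L, S, E), last) (i, x) =
          ((if x ∈ bg then L else L ++ [x],
            if x ∈ bg then S else S ++ [(i : Int)],
            if last ∈ bg then E else E ++ [(i : Int)]), x) from by simp [pvStepA, hx]]
      have H := ih (i + 1) x (if x ∈ bg then L else L ++ [x])
        (if x ∈ bg then S else S ++ [(i : Int)]) (if last ∈ bg then E else E ++ [(i : Int)])
      rw [show (i + (x :: t).length) = ((i + 1) + t.length) from by simp; omega]
      rw [H]
      rw [show pvCL last (x :: t) = 0 from by simp [pvCL]; intro hc; exact absurd hc hx]
      simp only [Nat.add_zero, List.drop_zero]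
      rw [pvG_cons]
      rw [show i + (pvCL x t + 1) = (i + 1) + pvCL x t from by omega]
      split_ifs with h1 h2 <;> simp [List.append_assoc]

theorem a_eq_g (fw bg : List String) (h : fw ≠ []) :
    get_labels_start_end_time fw bg = pvG bg 0 fw := by
  match fw with
  | x :: t =>
    simp only [get_labels_start_end_time]
    have H := foldA_eq bg (x :: t) 0 x
      (if x ∈ bg then ([] : List String) else [x])
      (if x ∈ bg then ([] : List Int) else [(0 : Int)]) []
    rw [show ((0 : Nat) + (x :: t).length) = (x :: t).length from by omega] at H
    rw [H]
    rw [pvG_cons]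
    rw [show pvCL x (x :: t) = pvCL x t + 1 from by simp [pvCL]]
    rw [show (0 : Nat) + (pvCL x t + 1) = pvCL x t + 1 from by omega]
    rw [show (x :: t).drop (pvCL x t + 1) = t.drop (pvCL x t) from rfl]
    split_ifs with hbg <;> simp

-- ===== VERDICT (by name: the statement is the Claim_ definition above) =====
theorem get_labels_start_end_time_spec : Claim_equal_get_labels_start_end_time := by
  intro fw bg _ hpre
  unfold Spec_get_labels_start_end_time
  rw [a_eq_g fw bg hpre, b_eq_g]

@[simp] theorem get_labels_start_end_time_raises : Claim_raises_get_labels_start_end_time := by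
  unfold Claim_raises_get_labels_start_end_time
  refine ⟨fun fw bg _ hr => ?_, by decide, by decide, ?_⟩
  · simp only [Raises_get_labels_start_end_time] at hr
    simp [Pre_get_labels_start_end_time, hr]
  · rw [pvRaiseWitness_get_labels_start_end_time, get_labels_start_end_time_alt, pvLoopB]
    simp [pvRaiseWitnessOut_get_labels_start_end_time]
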